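-- pv_equiv track=rewrite | github.com/kafuji/pmxmerge | pmxmerge_core.py | compute_face_segments
-- ===== SOURCE A (Python) =====
-- from typing import Dict, List, Tuple
--
-- def compute_face_segments(vertex_counts: List[int]) -> List[Tuple[int, int]]:
--     """Compute face index ranges (start, end) for each material."""
--     segments = []
--     offset = 0
--     for count in vertex_counts:
--         face_count = count // 3
--         segments.append((offset, offset + face_count))
--         offset += face_count
--     return segments
-- ===== SOURCE B (Python) =====
-- from typing import List, Tuple
--
-- def compute_face_segments(vertex_counts: List[int]) -> List[Tuple[int, int]]:
--     """Compute face index ranges (start, end) for each material.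
--
--     Each segment is computed independently as a pair of prefix sums over
--     the face counts of the preceding materials (no running state)."""
--     return [(sum(c // 3 for c in vertex_counts[:i]),
--              sum(c // 3 for c in vertex_counts[:i + 1]))
--             for i in range(len(vertex_counts))]
-- ===== Notes on version B (the rewrite author's own statement) =====
-- stated objective: alternative
-- what changed: Each (start, end) pair is computed independently as two prefix sums over slices of the input (a stateless per-index closed form), instead of a single stateful loop threading a running offset; this trades O(n) for O(n^2) time.
import Mathlib
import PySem

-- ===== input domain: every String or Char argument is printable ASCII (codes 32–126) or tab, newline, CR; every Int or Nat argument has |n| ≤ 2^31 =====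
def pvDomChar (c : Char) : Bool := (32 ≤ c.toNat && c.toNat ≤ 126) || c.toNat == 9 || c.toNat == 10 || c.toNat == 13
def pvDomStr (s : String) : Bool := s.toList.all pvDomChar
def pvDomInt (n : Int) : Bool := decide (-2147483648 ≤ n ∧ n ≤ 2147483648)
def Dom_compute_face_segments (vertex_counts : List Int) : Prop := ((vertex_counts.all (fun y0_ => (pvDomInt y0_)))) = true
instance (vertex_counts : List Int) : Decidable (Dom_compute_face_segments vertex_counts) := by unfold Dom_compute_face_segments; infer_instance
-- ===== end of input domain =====

-- B changes: each (start, end) pair is computed independently as two prefix sums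
-- over slices, instead of a single stateful loop threading a running offset (alternative).

-- ===== PORT A =====
-- loop: for count in vertex_counts: append (offset, offset + count//3); offset += count//3
def pvALoop (counts : List Int) (offset : Int) (segments : List (Int × Int)) : List (Int × Int) :=
  match counts with
  | [] => segments
  | count :: rest =>
    let face_count := PySem.Int.floordiv count 3
    pvALoop rest (offset + face_count) (segments ++ [(offset, offset + face_count)])

def compute_face_segments (vertex_counts : List Int) : List (Int × Int) :=
  pvALoop vertex_counts 0 []

-- ===== PORT B =====
-- sum(c // 3 for c in xs[:i]); since 0 ≤ i ≤ len(xs) here, the slice xs[:i] is exactly List.take i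
def pvPrefix (xs : List Int) (i : Nat) : Int :=
  ((xs.take i).map (fun c => PySem.Int.floordiv c 3)).sum

def compute_face_segments_alt (vertex_counts : List Int) : List (Int × Int) :=
  (List.range vertex_counts.length).map
    (fun i => (pvPrefix vertex_counts i, pvPrefix vertex_counts (i + 1)))

-- ===== PRECONDITION & SPEC =====
def Spec_compute_face_segments (vertex_counts : List Int) (out : List (Int × Int)) : Prop := out = compute_face_segments_alt vertex_counts
instance (vertex_counts : List Int) (out : List (Int × Int)) : Decidable (Spec_compute_face_segments vertex_counts out) := by unfold Spec_compute_face_segments; infer_instance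

-- ===== CLAIM (what is proved, stated in full; the proofs are below) =====
def Claim_equal_compute_face_segments : Prop := ∀ (vertex_counts : List Int), Dom_compute_face_segments vertex_counts → Spec_compute_face_segments vertex_counts (compute_face_segments vertex_counts)

-- ===== LEMMAS AND PROOFS =====

lemma pvALoop_eq (counts : List Int) (offset : Int) (acc : List (Int × Int)) :
    pvALoop counts offset acc =
      acc ++ (List.range counts.length).map
        (fun i => (offset + pvPrefix counts i, offset + pvPrefix counts (i + 1))) := by
  induction counts generalizing offset acc with
  | nil => simp [pvALoop]
  | cons c rest ih =>
    rw [pvALoop, ih, List.append_assoc]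
    congr 1
    simp only [List.length_cons, List.range_succ_eq_map, List.map_cons, List.map_map]
    simp [pvPrefix, Function.comp, add_assoc]

-- ===== VERDICT (by name: the statement is the Claim_ definition above) =====
theorem compute_face_segments_spec : Claim_equal_compute_face_segments := by
  intro vs _
  show compute_face_segments vs = compute_face_segments_alt vs
  rw [compute_face_segments, compute_face_segments_alt, pvALoop_eq]
  simp
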